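-- pv_equiv track=rewrite | github.com/bifrostai/vla-evaluation-harness | src/vla_eval/docker_resources.py | _format_cpuset
-- ===== SOURCE A (Python) =====
-- def _format_cpuset(cpu_ids: list[int]) -> str:
--     """Format CPU IDs into cpuset notation (e.g. ``"0-5,12-17"``)."""
--     ids = sorted(cpu_ids)
--     ranges: list[str] = []
--     start = prev = ids[0]
--     for c in ids[1:]:
--         if c == prev + 1:
--             prev = c
--         else:
--             ranges.append(f"{start}-{prev}" if start != prev else str(start))
--             start = prev = c
--     ranges.append(f"{start}-{prev}" if start != prev else str(start))
--     return ",".join(ranges)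
-- ===== SOURCE B (Python) =====
-- from itertools import groupby
--
--
-- def _format_cpuset(cpu_ids: list[int]) -> str:
--     """Format CPU IDs into cpuset notation (e.g. ``"0-5,12-17"``)."""
--     ids = sorted(cpu_ids)
--     parts: list[str] = []
--     for _, grp in groupby(enumerate(ids), key=lambda p: p[1] - p[0]):
--         run = [v for _, v in grp]
--         parts.append(str(run[0]) if run[0] == run[-1] else f"{run[0]}-{run[-1]}")
--     return ",".join(parts)
-- ===== Notes on version B (the rewrite author's own statement) =====
-- stated objective: idiomatic
-- what changed: Replaces A's running start/prev state machine with an itertools.groupby decomposition keyed by value-minus-index that splits the sorted list into maximal consecutive runs, formatting each run from its first and last element.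
import Mathlib
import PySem

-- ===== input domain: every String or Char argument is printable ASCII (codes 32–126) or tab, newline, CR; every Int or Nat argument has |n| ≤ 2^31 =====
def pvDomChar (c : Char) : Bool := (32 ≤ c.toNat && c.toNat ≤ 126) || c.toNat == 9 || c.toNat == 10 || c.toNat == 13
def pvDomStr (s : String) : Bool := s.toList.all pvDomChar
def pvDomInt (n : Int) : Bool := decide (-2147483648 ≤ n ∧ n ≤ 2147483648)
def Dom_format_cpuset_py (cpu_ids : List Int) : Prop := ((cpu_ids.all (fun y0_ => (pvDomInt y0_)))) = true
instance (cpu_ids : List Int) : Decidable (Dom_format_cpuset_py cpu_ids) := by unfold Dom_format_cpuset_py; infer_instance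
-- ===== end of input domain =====

-- B replaces A's running start/prev state machine with a groupby-by-(value - index)
-- decomposition into maximal consecutive runs (idiomatic; return value only).


-- ===== PORT A =====
-- f"{start}-{prev}" if start != prev else str(start)
def pvFmtA (start prev : Int) : String :=
  if start ≠ prev then PySem.Int.toStr start ++ "-" ++ PySem.Int.toStr prev
  else PySem.Int.toStr start

def format_cpuset_py (cpu_ids : List Int) : String :=
  let ids := PySem.List.sorted cpu_ids (fun x => x) false
  match ids with
  | [] => ""          -- ids[0] raises IndexError in Python here (excluded by Pre_)
  | h :: rest =>      -- start = prev = ids[0]; for c in ids[1:]: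
    let st := rest.foldl
      (fun (st : List String × Int × Int) c =>
        if c = st.2.2 + 1 then (st.1, st.2.1, c)
        else (st.1 ++ [pvFmtA st.2.1 st.2.2], c, c)) ([], h, h)
    PySem.Str.join "," (st.1 ++ [pvFmtA st.2.1 st.2.2])

-- ===== PORT B =====
-- groupby(enumerate(ids), key=lambda p: p[1] - p[0]) : maximal runs of values
def pvGroupRuns : List (Int × Int) → List (List Int)
  | [] => []
  | (i, v) :: rest =>
    match rest, pvGroupRuns rest with
    | (j, w) :: _, g :: gs =>
        if v - i = w - j then (v :: g) :: gs else [v] :: g :: gs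
    | _, _ => [[v]]

-- str(run[0]) if run[0] == run[-1] else f"{run[0]}-{run[-1]}"
def pvFmtGrp (run : List Int) : String :=
  match run, run.getLast? with
  | f :: _, some l =>
      if f = l then PySem.Int.toStr f
      else PySem.Int.toStr f ++ "-" ++ PySem.Int.toStr l
  | _, _ => ""        -- unreachable: groups are nonempty

def format_cpuset_py_alt (cpu_ids : List Int) : String :=
  let ids := PySem.List.sorted cpu_ids (fun x => x) false
  PySem.Str.join "," ((pvGroupRuns (PySem.List.enumerate ids)).map pvFmtGrp)

-- ===== PRECONDITION & SPEC =====
-- Pre_ excludes only the empty list, on which A raises IndexError (ids[0]).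
def Pre_format_cpuset_py (cpu_ids : List Int) : Prop := cpu_ids ≠ []
instance (cpu_ids : List Int) : Decidable (Pre_format_cpuset_py cpu_ids) := by
  unfold Pre_format_cpuset_py; infer_instance
def pvWitness_format_cpuset_py : List Int := [3, 1, 2, 7]

def Spec_format_cpuset_py (cpu_ids : List Int) (out : String) : Prop := out = format_cpuset_py_alt cpu_ids
instance (cpu_ids : List Int) (out : String) : Decidable (Spec_format_cpuset_py cpu_ids out) := by unfold Spec_format_cpuset_py; infer_instance

-- ===== CLAIM (what is proved, stated in full; the proofs are below) =====
def Claim_equal_format_cpuset_py : Prop := ∀ (cpu_ids : List Int), Dom_format_cpuset_py cpu_ids → Pre_format_cpuset_py cpu_ids → Spec_format_cpuset_py cpu_ids (format_cpuset_py cpu_ids)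

-- ===== LEMMAS AND PROOFS =====

-- canonical recursive description of A's loop output
def runA (start prev : Int) : List Int → List String
  | [] => [pvFmtA start prev]
  | c :: t => if c = prev + 1 then runA start c t else pvFmtA start prev :: runA c c t

theorem foldA_eq_runA (t : List Int) : ∀ (ranges : List String) (start prev : Int),
    (let st := t.foldl
      (fun (st : List String × Int × Int) c =>
        if c = st.2.2 + 1 then (st.1, st.2.1, c)
        else (st.1 ++ [pvFmtA st.2.1 st.2.2], c, c)) (ranges, start, prev)
     st.1 ++ [pvFmtA st.2.1 st.2.2]) = ranges ++ runA start prev t := by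
  induction t with
  | nil => intro ranges start prev; simp [runA]
  | cons c t ih =>
    intro ranges start prev
    simp only [List.foldl_cons, runA]
    by_cases h : c = prev + 1
    · simp [h, ih]
    · simp [h, ih, List.append_assoc]

theorem groupRuns_cons (p : Int × Int) (l : List (Int × Int)) :
    ∃ g gs, pvGroupRuns (p :: l) = (p.2 :: g) :: gs := by
  obtain ⟨i, v⟩ := p
  cases l with
  | nil => exact ⟨[], [], rfl⟩
  | cons q l' =>
    obtain ⟨j, w⟩ := q
    obtain ⟨g, gs, hg⟩ := groupRuns_cons (j, w) l'
    have hunf : pvGroupRuns ((i, v) :: (j, w) :: l')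
        = if v - i = w - j then (v :: w :: g) :: gs else [v] :: (w :: g) :: gs := by
      rw [pvGroupRuns.eq_def]; dsimp only
      rw [hg]
    by_cases h : v - i = w - j
    · exact ⟨w :: g, gs, by rw [hunf, if_pos h]⟩
    · exact ⟨[], (w :: g) :: gs, by rw [hunf, if_neg h]⟩

theorem fmtGrp_cons (v : Int) (g : List Int) :
    pvFmtGrp (v :: g) = pvFmtA v ((v :: g).getLastD v) := by
  cases hl : (v :: g).getLast? with
  | none => simp at hl
  | some l =>
    have hd : (v :: g).getLastD v = l := by
      rw [List.getLastD_eq_getLast?, hl]; rfl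
    simp only [pvFmtGrp, pvFmtA, hl, hd]
    by_cases h : v = l
    · simp [h]
    · simp [h]

-- first group formatted with an overridden start, the rest as pvFmtGrp
def fmtRuns (start : Int) : List (List Int) → List String
  | [] => []
  | g :: gs => pvFmtA start (g.getLastD start) :: gs.map pvFmtGrp

theorem fmtRuns_eq_runA (t : List Int) : ∀ (i start prev : Int),
    fmtRuns start (pvGroupRuns (PySem.List.enumerate (prev :: t) i)) = runA start prev t := by
  induction t with
  | nil =>
    intro i start prev
    simp [PySem.List.enumerate_cons, PySem.List.enumerate_nil, pvGroupRuns, fmtRuns, runA,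
      List.getLastD]
  | cons c t' ih =>
    intro i start prev
    obtain ⟨g, gs, hg⟩ := groupRuns_cons (i + 1, c) (PySem.List.enumerate t' (i + 1 + 1))
    have henum2 : PySem.List.enumerate (c :: t') (i + 1)
        = (i + 1, c) :: PySem.List.enumerate t' (i + 1 + 1) := PySem.List.enumerate_cons ..
    have hunf : pvGroupRuns (PySem.List.enumerate (prev :: c :: t') i)
        = if prev - i = c - (i + 1) then (prev :: c :: g) :: gs
          else [prev] :: (c :: g) :: gs := by
      rw [PySem.List.enumerate_cons, henum2]
      rw [pvGroupRuns.eq_def]; dsimp only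
      rw [show pvGroupRuns ((i + 1, c) :: PySem.List.enumerate t' (i + 1 + 1)) = (c :: g) :: gs
        from hg]
    by_cases hc : c = prev + 1
    · have hk : prev - i = c - (i + 1) := by omega
      rw [hunf, if_pos hk]
      have ihx := ih (i + 1) start c
      rw [henum2, hg] at ihx
      simp only [fmtRuns] at ihx ⊢
      rw [show runA start prev (c :: t') = runA start c t' from by rw [runA, if_pos hc], ← ihx]
      simp [List.getLastD]
    · have hk : ¬ (prev - i = c - (i + 1)) := by omega
      rw [hunf, if_neg hk]
      have ihx := ih (i + 1) c c
      rw [henum2, hg] at ihx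
      simp only [fmtRuns] at ihx ⊢
      rw [show runA start prev (c :: t') = pvFmtA start prev :: runA c c t' from by
        rw [runA, if_neg hc], ← ihx]
      simp [List.getLastD, fmtGrp_cons]

theorem map_fmtGrp_eq_fmtRuns (p : Int × Int) (l : List (Int × Int)) :
    (pvGroupRuns (p :: l)).map pvFmtGrp = fmtRuns p.2 (pvGroupRuns (p :: l)) := by
  obtain ⟨g, gs, hg⟩ := groupRuns_cons p l
  rw [hg]
  simp [fmtRuns, fmtGrp_cons]

-- ===== VERDICT (by name: the statement is the Claim_ definition above) =====
theorem format_cpuset_py_spec : Claim_equal_format_cpuset_py := by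
  intro cpu_ids _ hpre
  unfold Spec_format_cpuset_py format_cpuset_py format_cpuset_py_alt
  have hnil : PySem.List.sorted cpu_ids (fun x => x) false ≠ [] := by
    simpa [PySem.List.sorted_eq_nil_iff] using hpre
  cases hids : PySem.List.sorted cpu_ids (fun x => x) false with
  | nil => exact absurd hids hnil
  | cons h t =>
    dsimp only
    have hA := foldA_eq_runA t [] h h
    simp only at hA
    rw [hA, List.nil_append]
    have henum : PySem.List.enumerate (h :: t) 0 = (0, h) :: PySem.List.enumerate t 1 :=
      PySem.List.enumerate_cons ..
    have hB : (pvGroupRuns (PySem.List.enumerate (h :: t) 0)).map pvFmtGrp = runA h h t := by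
      rw [henum, map_fmtGrp_eq_fmtRuns (0, h) (PySem.List.enumerate t 1), ← henum]
      exact fmtRuns_eq_runA t 0 h h
    rw [show PySem.List.enumerate (h :: t) = PySem.List.enumerate (h :: t) 0 from rfl, hB]
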